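-- pv_equiv track=rewrite | github.com/jll123567/Sysi | sysObjects/Profiles.py | convertToSetsList
-- ===== SOURCE A (Python) =====
-- def convertToSetsList(vals, longest):
--     """
--     Convert vals from a ``list`` of parents values to a list of the 0 to nth of value from each parent.
--
--     The length of the outputted lists of values are determined by longest.
--
--     :param list vals: The list of values to convert the formatting of.
--     :param int longest: The length of the parent values which have the longest length.
--     :return: The converted values.
--     :rtype: list
--     """
--     sets = []  # Go from  vals = [<parent>, ...] parent=[<num>, ...]
--     # to sets = [<numSet>, ...] numSet = [<numFromParent>, ...].
--     for idx in range(longest):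
--         numSet = []
--         for parent in vals:
--             try:  # If a list is shorter than longest. When trying to index an out of bound value just skip this
--                 # list.
--                 numSet.append(parent[idx])
--             except IndexError:
--                 pass
--         sets.append(numSet)
--     return sets
-- ===== SOURCE B (Python) =====
-- def convertToSetsList(vals, longest):
--     """Preallocate one bucket per index, then distribute each parent's
--     values into the buckets in a single pass over the actual elements."""
--     buckets = [[] for _ in range(longest)]
--     for parent in vals:
--         for i, v in enumerate(parent[:len(buckets)]):
--             buckets[i].append(v)
--     return buckets
-- ===== Notes on version B (the rewrite author's own statement) =====
-- stated objective: faster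
-- what changed: Instead of scanning every parent once per index (catching IndexError for short parents), B preallocates one bucket per index and distributes each parent's actual elements into the buckets in a single pass.
import Mathlib
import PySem

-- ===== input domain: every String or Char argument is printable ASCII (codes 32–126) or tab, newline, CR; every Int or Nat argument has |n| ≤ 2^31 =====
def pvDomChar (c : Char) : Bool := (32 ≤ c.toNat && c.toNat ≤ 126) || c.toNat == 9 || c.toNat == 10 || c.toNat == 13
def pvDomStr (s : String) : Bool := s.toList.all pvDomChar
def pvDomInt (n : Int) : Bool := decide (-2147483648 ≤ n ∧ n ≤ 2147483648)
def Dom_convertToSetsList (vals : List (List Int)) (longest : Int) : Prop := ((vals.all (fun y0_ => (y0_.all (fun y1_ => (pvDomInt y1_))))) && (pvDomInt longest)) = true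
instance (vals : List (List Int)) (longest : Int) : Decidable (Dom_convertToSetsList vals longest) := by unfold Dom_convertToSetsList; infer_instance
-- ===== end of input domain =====

-- B preallocates one bucket per index and distributes each parent's elements in one pass,
-- instead of A's rescan of every parent for every index; return values proved equal on all inputs.

-- ===== PORT A =====
def convertToSetsList (vals : List (List Int)) (longest : Int) : List (List Int) :=
  (PySem.List.pyRange 0 longest 1).foldl
    (fun sets idx =>
      sets ++ [vals.foldl
        (fun numSet parent =>
          match PySem.List.pyGet? parent idx with
          | some v => numSet ++ [v]      -- numSet.append(parent[idx])
          | none => numSet)              -- except IndexError: pass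
        []])
    []

-- ===== PORT B =====
def convertToSetsList_alt (vals : List (List Int)) (longest : Int) : List (List Int) :=
  let buckets := (PySem.List.pyRange 0 longest 1).map (fun _ => ([] : List Int))
  vals.foldl
    (fun bs parent =>
      (PySem.List.enumerate (PySem.List.slice parent none (some (bs.length : Int))) 0).foldl
        (fun b iv => PySem.List.pySetD b iv.1 (PySem.List.pyGetD b iv.1 [] ++ [iv.2]))
        bs)
    buckets

-- ===== PRECONDITION & SPEC =====
def Spec_convertToSetsList (vals : List (List Int)) (longest : Int) (out : List (List Int)) : Prop := out = convertToSetsList_alt vals longest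
instance (vals : List (List Int)) (longest : Int) (out : List (List Int)) : Decidable (Spec_convertToSetsList vals longest out) := by unfold Spec_convertToSetsList; infer_instance

-- ===== CLAIM (what is proved, stated in full; the proofs are below) =====
def Claim_equal_convertToSetsList : Prop := ∀ (vals : List (List Int)) (longest : Int), Dom_convertToSetsList vals longest → Spec_convertToSetsList vals longest (convertToSetsList vals longest)

-- ===== LEMMAS AND PROOFS =====

/-- What B's inner loop does to the buckets, as a structural function. -/
def pvMerge : List (List Int) → List Int → List (List Int)
  | [], _ => []
  | b :: bs, [] => b :: bs
  | b :: bs, x :: xs => (b ++ [x]) :: pvMerge bs xs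

theorem pvMerge_getElem? (bs : List (List Int)) (p : List Int) (i : Nat) :
    (pvMerge bs p)[i]? = bs[i]?.map (fun b => b ++ p[i]?.toList) := by
  induction bs generalizing p i with
  | nil => simp [pvMerge]
  | cons b bs ih =>
    cases p with
    | nil => cases i <;> simp [pvMerge]
    | cons x xs => cases i <;> simp [pvMerge, ih]

/-- A's inner loop over the parents is a filterMap. -/
theorem pvInnerA (vals : List (List Int)) (idx : Int) (acc : List Int) :
    vals.foldl
      (fun numSet parent =>
        match PySem.List.pyGet? parent idx with
        | some v => numSet ++ [v]
        | none => numSet) acc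
      = acc ++ vals.filterMap (fun p => PySem.List.pyGet? p idx) := by
  induction vals generalizing acc with
  | nil => simp
  | cons p vals ih =>
    simp only [List.foldl_cons, List.filterMap_cons]
    cases h : PySem.List.pyGet? p idx <;> simp [ih]

/-- B's inner (enumerate) loop, with an already-processed prefix `pre`, is pvMerge. -/
theorem pvEnumFold (bs : List (List Int)) (l : List Int) (s : Nat) (pre : List (List Int))
    (hpre : pre.length = s) :
    (PySem.List.enumerate (l.take bs.length) (s : Int)).foldl
      (fun b iv => PySem.List.pySetD b iv.1 (PySem.List.pyGetD b iv.1 [] ++ [iv.2]))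
      (pre ++ bs)
    = pre ++ pvMerge bs l := by
  induction bs generalizing l s pre with
  | nil => simp [pvMerge]
  | cons b bs ih =>
    cases l with
    | nil => simp [pvMerge]
    | cons x xs =>
      simp only [List.length_cons, List.take_succ_cons, PySem.List.enumerate_cons, List.foldl_cons]
      have hb : (pre ++ b :: bs)[s]? = some b := by
        rw [← hpre, List.getElem?_append_right (Nat.le_refl _)]
        simp
      have hget : PySem.List.pyGetD (pre ++ b :: bs) (s : Int) [] = b := by
        rw [PySem.List.pyGetD_natCast, List.getD, hb]; rfl
      have hset : PySem.List.pySetD (pre ++ b :: bs) (s : Int) (b ++ [x])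
          = (pre ++ [b ++ [x]]) ++ bs := by
        rw [PySem.List.pySetD_natCast, ← hpre]
        rw [List.set_append_right _ _ (Nat.le_refl _)]
        simp
      simp only [hget, hset]
      have hcast : (s : Int) + 1 = ((s + 1 : Nat) : Int) := by push_cast; ring
      rw [hcast, ih xs (s + 1) (pre ++ [b ++ [x]]) (by simp [hpre])]
      simp [pvMerge]

/-- B's accumulated fold, index-wise. -/
theorem pvFoldMerge (vals : List (List Int)) (bs : List (List Int)) (i : Nat) :
    (vals.foldl pvMerge bs)[i]? = bs[i]?.map (fun b => b ++ vals.filterMap (fun p => p[i]?)) := by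
  induction vals generalizing bs with
  | nil => simp
  | cons p vals ih =>
    simp only [List.foldl_cons, List.filterMap_cons]
    rw [ih, pvMerge_getElem?]
    cases hb : bs[i]? with
    | none => simp
    | some b =>
      cases hp : p[i]? <;> simp

theorem pvB_eq (vals : List (List Int)) (longest : Int) :
    convertToSetsList_alt vals longest
      = vals.foldl pvMerge ((PySem.List.pyRange 0 longest 1).map (fun _ => ([] : List Int))) := by
  unfold convertToSetsList_alt
  have hstep : (fun (bs : List (List Int)) (parent : List Int) =>
      (PySem.List.enumerate (PySem.List.slice parent none (some (bs.length : Int))) 0).foldl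
        (fun b iv => PySem.List.pySetD b iv.1 (PySem.List.pyGetD b iv.1 [] ++ [iv.2])) bs)
      = pvMerge := by
    funext bs parent
    have h := pvEnumFold bs parent 0 [] rfl
    simp only [List.nil_append, Nat.cast_zero] at h
    rw [PySem.List.slice_to_natCast, h]
  rw [hstep]

-- ===== VERDICT (by name: the statement is the Claim_ definition above) =====
theorem convertToSetsList_spec : Claim_equal_convertToSetsList := by
  intro vals longest _
  unfold Spec_convertToSetsList
  rw [pvB_eq]
  unfold convertToSetsList
  rw [PySem.List.pyRange_one 0 longest]
  apply List.ext_getElem?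
  intro i
  rw [pvFoldMerge]
  rw [PySem.List.foldl_append_singleton_eq_map, List.nil_append]
  simp only [List.getElem?_map]
  by_cases hi : i < (longest - 0).toNat
  · rw [List.getElem?_range hi]
    simp only [Option.map_some, zero_add]
    rw [pvInnerA, List.nil_append]
    exact congrArg some (List.filterMap_congr (fun p _ => by rw [PySem.List.pyGet?_natCast]))
  · rw [List.getElem?_eq_none (by simpa using hi)]
    rfl
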